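-- pv_equiv track=rewrite | github.com/octahedron00/Driving_Mind | _mode.py | get_vote_count_result
-- ===== SOURCE A (Python) =====
-- def get_vote_count_result(count_map_list, key_predict):
--     '''
--         getting the most shown value for each key
--     '''
--
--
--     result = dict()
--     for key in key_predict:
--         list_count = []
--         for count_map in count_map_list:
--             list_count.append(count_map.get(key, 0))
--
--         max_n = 1
--         max_i = 0
--         for i in range(len(list_count)):
--             count_n = 0
--             for j in range(len(list_count)):
--                 if list_count[i] == list_count[j]:
--                     count_n += 1
--             if count_n > max_n:
--                 max_n, max_i = count_n, i
--         result[key] = list_count[max_i]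
--
--     return result
-- ===== SOURCE B (Python) =====
-- def get_vote_count_result(count_map_list, key_predict):
--     '''
--         getting the most shown value for each key
--     '''
--     result = {}
--     for key in key_predict:
--         freq = {}
--         for count_map in count_map_list:
--             v = count_map.get(key, 0)
--             freq[v] = freq.get(v, 0) + 1
--         # first-inserted key among those with maximal frequency = A's first-index winner
--         result[key] = max(freq, key=freq.get)
--     return result
-- ===== Notes on version B (the rewrite author's own statement) =====
-- stated objective: faster
-- what changed: Replaces A's O(m^2) all-pairs equality-count loop per key by a single-pass frequency dict followed by one argmax over the distinct values (max with key=freq.get, whose first-inserted tie-break reproduces A's first-index winner).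
import Mathlib
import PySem

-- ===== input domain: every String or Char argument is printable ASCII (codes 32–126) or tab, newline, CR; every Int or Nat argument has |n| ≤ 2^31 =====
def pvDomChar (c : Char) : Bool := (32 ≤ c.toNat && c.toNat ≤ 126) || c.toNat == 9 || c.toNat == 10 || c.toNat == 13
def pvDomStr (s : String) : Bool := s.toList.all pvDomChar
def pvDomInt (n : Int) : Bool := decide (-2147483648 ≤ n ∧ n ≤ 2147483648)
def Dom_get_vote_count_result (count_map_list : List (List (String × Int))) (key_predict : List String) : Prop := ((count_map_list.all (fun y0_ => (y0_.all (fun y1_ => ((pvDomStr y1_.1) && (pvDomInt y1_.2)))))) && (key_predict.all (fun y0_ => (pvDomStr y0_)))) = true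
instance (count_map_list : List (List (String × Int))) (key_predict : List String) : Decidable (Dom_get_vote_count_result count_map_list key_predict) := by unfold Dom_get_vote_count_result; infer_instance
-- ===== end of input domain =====

-- B replaces A's O(m^2) all-pairs counting loop per key by a one-pass frequency dict
-- plus a single argmax over the distinct values (objective: faster).

-- ===== PORT A =====
-- the 'max_n/max_i' double loop over range(len(list_count)) of A, kept as a helper
def voteLoopA (list_count : List Int) : Int × Int :=
  (PySem.List.pyRange 0 (PySem.List.len list_count) 1).foldl
    (fun (st : Int × Int) i =>
      let count_n : Int :=
        (PySem.List.pyRange 0 (PySem.List.len list_count) 1).foldl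
          (fun cn j =>
            if PySem.List.pyGetD list_count i 0 == PySem.List.pyGetD list_count j 0 then cn + 1 else cn)
          0
      if count_n > st.1 then (count_n, i) else st)
    ((1 : Int), (0 : Int))

-- 'list_count[max_i]' is ported with pyGetD default 0: inside Pre_ the index is in range
-- (Python raises IndexError exactly on the inputs Pre_ excludes)
def get_vote_count_result (count_map_list : List (List (String × Int))) (key_predict : List String) : List (String × Int) :=
  (key_predict.foldl
    (fun (result : PySem.Dict String Int) key =>
      let list_count : List Int :=
        count_map_list.foldl
          (fun acc count_map => acc ++ [PySem.Dict.getD (PySem.Dict.mk count_map) key 0]) []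
      result.insert key (PySem.List.pyGetD list_count (voteLoopA list_count).2 0))
    PySem.Dict.empty).items

-- ===== PORT B =====
-- 'max(freq, key=freq.get)' over the insertion-ordered dict keys; Option.getD 0 is
-- unreachable inside Pre_ (Python raises ValueError exactly on the inputs Pre_ excludes)
def get_vote_count_result_alt (count_map_list : List (List (String × Int))) (key_predict : List String) : List (String × Int) :=
  (key_predict.foldl
    (fun (result : PySem.Dict String Int) key =>
      let freq : PySem.Dict Int Int :=
        count_map_list.foldl
          (fun d count_map =>
            let v := PySem.Dict.getD (PySem.Dict.mk count_map) key 0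
            d.insert v (d.getD v 0 + 1))
          PySem.Dict.empty
      result.insert key ((PySem.List.max? freq.keys (fun v => freq.getD v 0)).getD 0))
    PySem.Dict.empty).items

-- ===== PRECONDITION & SPEC =====
-- Pre_ excludes only the inputs where Python A raises IndexError: a nonempty key list
-- with an empty count_map_list (B raises ValueError there too)
def Pre_get_vote_count_result (count_map_list : List (List (String × Int))) (key_predict : List String) : Prop :=
  key_predict = [] ∨ count_map_list ≠ []
instance (count_map_list : List (List (String × Int))) (key_predict : List String) : Decidable (Pre_get_vote_count_result count_map_list key_predict) := by unfold Pre_get_vote_count_result; infer_instance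

def pvWitness_get_vote_count_result : (List (List (String × Int))) × List String :=
  ([[("a", 1)], [("a", 2)], [("a", 2)]], ["a", "b"])

def Spec_get_vote_count_result (count_map_list : List (List (String × Int))) (key_predict : List String) (out : List (String × Int)) : Prop := out = get_vote_count_result_alt count_map_list key_predict
instance (count_map_list : List (List (String × Int))) (key_predict : List String) (out : List (String × Int)) : Decidable (Spec_get_vote_count_result count_map_list key_predict out) := by unfold Spec_get_vote_count_result; infer_instance

-- ===== CLAIM (what is proved, stated in full; the proofs are below) =====
def Claim_equal_get_vote_count_result : Prop := ∀ (count_map_list : List (List (String × Int))) (key_predict : List String), Dom_get_vote_count_result count_map_list key_predict → Pre_get_vote_count_result count_map_list key_predict → Spec_get_vote_count_result count_map_list key_predict (get_vote_count_result count_map_list key_predict)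

-- ===== LEMMAS AND PROOFS =====

-- A's outer loop with the inner counting loop replaced by List.count
def stepA (L : List Int) (st : Int × Int) (i : Int) : Int × Int :=
  if (L.count (PySem.List.pyGetD L i 0) : Int) > st.1
  then ((L.count (PySem.List.pyGetD L i 0) : Int), i) else st

-- A's inner loop counts occurrences of list_count[i]
theorem innerLoop_eq_count (L : List Int) (i : Int) :
    (PySem.List.pyRange 0 (PySem.List.len L) 1).foldl
      (fun cn j => if PySem.List.pyGetD L i 0 == PySem.List.pyGetD L j 0 then cn + 1 else cn) 0
    = (L.count (PySem.List.pyGetD L i 0) : Int) := by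
  have h1 := PySem.List.foldl_pyRange_zero_pyGetD L (0 : Int)
      (fun cn w => if PySem.List.pyGetD L i 0 == w then cn + 1 else cn) (0 : Int)
  rw [h1]
  refine (PySem.List.foldl_congr_mem L _
      (fun cn w => if w == PySem.List.pyGetD L i 0 then cn + 1 else cn) 0 ?_).trans ?_
  · intro acc x _
    rw [Bool.beq_comm]
  · rw [PySem.List.foldl_beq_add_one]
    simp

theorem voteLoopA_eq_stepA (L : List Int) :
    voteLoopA L = (PySem.List.pyRange 0 (PySem.List.len L) 1).foldl (stepA L) (1, 0) := by
  unfold voteLoopA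
  apply PySem.List.foldl_congr_mem
  intro st i _
  simp only [innerLoop_eq_count, stepA]

-- invariant of A's argmax loop over the first k indices
def InvA (L : List Int) (k : ℕ) (s : Int × Int) : Prop :=
  (s = (1, 0) ∧ ∀ i < k, (L.count (L.getD i 0) : Int) ≤ 1) ∨
  (∃ jn : ℕ, jn < k ∧ s = ((L.count (L.getD jn 0) : Int), (jn : Int)) ∧
    2 ≤ (L.count (L.getD jn 0) : Int) ∧
    (∀ i < k, (L.count (L.getD i 0) : Int) ≤ (L.count (L.getD jn 0) : Int)) ∧
    (∀ i < jn, (L.count (L.getD i 0) : Int) < (L.count (L.getD jn 0) : Int)))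

theorem loopA_inv (L : List Int) (k : ℕ) (hk : k ≤ L.length) :
    InvA L k ((PySem.List.pyRange 0 (k : Int) 1).foldl (stepA L) (1, 0)) := by
  induction k with
  | zero =>
    rw [PySem.List.pyRange_one_eq_nil (by omega)]
    exact Or.inl ⟨rfl, by omega⟩
  | succ k ih =>
    have hk' : k ≤ L.length := by omega
    have hr : PySem.List.pyRange 0 ((k + 1 : ℕ) : Int) 1
        = PySem.List.pyRange 0 (k : Int) 1 ++ [(k : Int)] := by
      have h : ((k + 1 : ℕ) : Int) = (k : Int) + 1 := by push_cast; ring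
      rw [h, PySem.List.pyRange_one_succ_right (by omega)]
    rw [hr, List.foldl_append]
    have hget : PySem.List.pyGetD L ((k : ℕ) : Int) 0 = L.getD k 0 :=
      PySem.List.pyGetD_natCast L k 0
    rcases ih hk' with ⟨hs, hall⟩ | ⟨jn, hjk, hs, h2, hle, hlt⟩
    · rw [hs]
      simp only [List.foldl_cons, List.foldl_nil, stepA, hget]
      by_cases hc : (L.count (L.getD k 0) : Int) > 1
      · rw [if_pos hc]
        refine Or.inr ⟨k, by omega, rfl, by omega, ?_, ?_⟩
        · intro i hi
          rcases Nat.lt_succ_iff_lt_or_eq.mp hi with h | h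
          · exact le_trans (hall i h) (by omega)
          · subst h; exact le_refl _
        · intro i hi
          exact lt_of_le_of_lt (hall i hi) hc
      · rw [if_neg hc]
        refine Or.inl ⟨rfl, ?_⟩
        intro i hi
        rcases Nat.lt_succ_iff_lt_or_eq.mp hi with h | h
        · exact hall i h
        · subst h; omega
    · rw [hs]
      simp only [List.foldl_cons, List.foldl_nil, stepA, hget]
      by_cases hc : (L.count (L.getD k 0) : Int) > (L.count (L.getD jn 0) : Int)
      · rw [if_pos hc]
        refine Or.inr ⟨k, by omega, rfl, by omega, ?_, ?_⟩
        · intro i hi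
          rcases Nat.lt_succ_iff_lt_or_eq.mp hi with h | h
          · exact le_trans (hle i h) (le_of_lt hc)
          · subst h; exact le_refl _
        · intro i hi
          exact lt_of_le_of_lt (hle i (by omega)) hc
      · rw [if_neg hc]
        refine Or.inr ⟨jn, by omega, rfl, h2, ?_, hlt⟩
        intro i hi
        rcases Nat.lt_succ_iff_lt_or_eq.mp hi with h | h
        · exact hle i h
        · subst h; omega

-- a fold keeping the first strict maximum, over pre ++ x :: post, lands on x
theorem firstmax_foldl {α : Type} (key : α → Int) (f : Option α → α → Option α)
    (hf1 : ∀ y, f none y = some y)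
    (hf2 : ∀ m y, f (some m) y = if key m < key y then some y else some m)
    (pre post : List α) (x : α)
    (h1 : ∀ y ∈ pre, key y < key x) (h2 : ∀ y ∈ post, ¬ key x < key y) :
    List.foldl f none (pre ++ x :: post) = some x := by
  have hpost : ∀ (p : List α), (∀ y ∈ p, ¬ key x < key y) →
      p.foldl f (some x) = some x := by
    intro p
    induction p with
    | nil => intro _; rfl
    | cons z t ih =>
      intro hall
      rw [List.foldl_cons, hf2, if_neg (hall z (by simp))]
      exact ih (fun y hy => hall y (by simp [hy]))
  have hpre : ∀ (p : List α) (a : Option α),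
      (a = none ∨ ∃ m, a = some m ∧ key m < key x) → (∀ y ∈ p, key y < key x) →
      (p.foldl f a = none ∨ ∃ m, p.foldl f a = some m ∧ key m < key x) := by
    intro p
    induction p with
    | nil => intro a ha _; exact ha
    | cons z t ih =>
      intro a ha hall
      rcases ha with rfl | ⟨m, rfl, hm⟩
      · rw [List.foldl_cons, hf1]
        exact ih (some z) (Or.inr ⟨z, rfl, hall z (by simp)⟩) (fun y hy => hall y (by simp [hy]))
      · rw [List.foldl_cons, hf2]
        by_cases hc : key m < key z
        · rw [if_pos hc]
          exact ih (some z) (Or.inr ⟨z, rfl, hall z (by simp)⟩) (fun y hy => hall y (by simp [hy]))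
        · rw [if_neg hc]
          exact ih (some m) (Or.inr ⟨m, rfl, hm⟩) (fun y hy => hall y (by simp [hy]))
  rw [List.foldl_append]
  rcases hpre pre none (Or.inl rfl) h1 with h | ⟨m, h, hm⟩
  · rw [h, List.foldl_cons, hf1]
    exact hpost post h2
  · rw [h, List.foldl_cons, hf2, if_pos hm]
    exact hpost post h2

-- PySem.List.max? picks the FIRST extremal element: a split witnessing that suffices
theorem max?_of_split {α : Type} (key : α → Int) (pre post : List α) (x : α)
    (h1 : ∀ y ∈ pre, key y < key x) (h2 : ∀ y ∈ post, ¬ key x < key y) :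
    PySem.List.max? (pre ++ x :: post) key = some x := by
  unfold PySem.List.max?
  exact firstmax_foldl key _ (fun _ => rfl) (fun _ _ => rfl) pre post x h1 h2

-- the elements of set(L) are ordered by their first-occurrence index in L
theorem ofList_pairwise_idxOf (L : List Int) :
    (PySem.Set.ofList L).Pairwise (fun x y => L.idxOf x < L.idxOf y) := by
  induction L with
  | nil => simp [PySem.Set.ofList_nil]
  | cons x t ih =>
    rw [PySem.Set.ofList_cons]
    constructor
    · intro y hy
      have hy' := (PySem.Set.mem_discard _ _ _).mp hy
      rw [List.idxOf_cons_self, List.idxOf_cons_ne t (Ne.symm hy'.2)]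
      omega
    · have hsub : (PySem.Set.discard (PySem.Set.ofList t) x).Pairwise
          (fun a b => t.idxOf a < t.idxOf b) := by
        unfold PySem.Set.discard
        exact List.Pairwise.filter _ ih
      apply hsub.imp_of_mem
      intro a b ha hb hab
      have ha' := (PySem.Set.mem_discard _ _ _).mp ha
      have hb' := (PySem.Set.mem_discard _ _ _).mp hb
      rw [List.idxOf_cons_ne t (Ne.symm ha'.2), List.idxOf_cons_ne t (Ne.symm hb'.2)]
      omega

-- the first occurrence of L[j] is at index ≤ j
theorem idxOf_getElem_le' (L : List Int) (j : ℕ) (hj : j < L.length) : L.idxOf (L[j]) ≤ j := by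
  have hjj : j < (L.take (j+1)).length := by simp [List.length_take]; omega
  have he : (L.take (j+1))[j]'hjj = L[j]'hj := List.getElem_take
  have hm : L[j] ∈ L.take (j+1) := he ▸ List.getElem_mem hjj
  have h := (List.mem_take_iff_idxOf_lt (List.getElem_mem hj)).mp hm
  omega

-- the per-key value computed by A equals the per-key value computed by B
theorem perKey_eq (L : List Int) :
    PySem.List.pyGetD L (voteLoopA L).2 0
    = (PySem.List.max? (PySem.Set.ofList L) (fun v => (L.count v : Int))).getD 0 := by
  rcases List.eq_nil_or_concat' L with rfl | hcc
  · rfl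
  · have hL : L ≠ [] := by rcases hcc with ⟨t, x, rfl⟩; simp
    have hlen : 0 < L.length := List.length_pos_iff.mpr hL
    rw [voteLoopA_eq_stepA, PySem.List.len_eq]
    have hinv := loopA_inv L L.length (le_refl _)
    -- the chosen index jn, with its properties, in both invariant cases
    obtain ⟨jn, hjlt, hs2, hmax, hfirst⟩ :
        ∃ jn : ℕ, jn < L.length ∧
          ((PySem.List.pyRange 0 (L.length : Int) 1).foldl (stepA L) (1, 0)).2 = (jn : Int) ∧
          (∀ i < L.length, (L.count (L.getD i 0) : Int) ≤ (L.count (L.getD jn 0) : Int)) ∧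
          (∀ i < jn, (L.count (L.getD i 0) : Int) < (L.count (L.getD jn 0) : Int)) := by
      rcases hinv with ⟨hs, hall⟩ | ⟨jn, hjk, hs, _, hle, hlt⟩
      · refine ⟨0, hlen, by rw [hs]; simp, ?_, by omega⟩
        intro i hi
        have h0 : (1 : Int) ≤ (L.count (L.getD 0 0) : Int) := by
          have hm : L.getD 0 0 ∈ L := by
            rw [List.getD_eq_getElem L 0 hlen]
            exact List.getElem_mem hlen
          have := List.count_pos_iff.mpr hm
          omega
        exact le_trans (hall i hi) h0
      · exact ⟨jn, hjk, by rw [hs], hle, hlt⟩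
    rw [hs2, PySem.List.pyGetD_natCast L jn 0]
    have haL : L.getD jn 0 ∈ L := by
      rw [List.getD_eq_getElem L 0 hjlt]
      exact List.getElem_mem hjlt
    -- the first occurrence of the winning value is exactly jn
    have hidx : L.idxOf (L.getD jn 0) = jn := by
      have hle' : L.idxOf (L.getD jn 0) ≤ jn := by
        have h := idxOf_getElem_le' L jn hjlt
        rwa [← List.getD_eq_getElem L 0 hjlt] at h
      rcases Nat.lt_or_ge (L.idxOf (L.getD jn 0)) jn with hlt' | hge
      · exfalso
        have hidxlen : L.idxOf (L.getD jn 0) < L.length := List.idxOf_lt_length_iff.mpr haL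
        have heq : (L.count (L.getD (L.idxOf (L.getD jn 0)) 0) : Int)
            = (L.count (L.getD jn 0) : Int) := by
          rw [List.getD_eq_getElem L 0 hidxlen, List.getElem_idxOf hidxlen]
        have := hfirst _ hlt'
        omega
      · omega
    -- counts, written through first-occurrence indices
    have hcnt : ∀ y ∈ L, (L.count y : Int) = (L.count (L.getD (L.idxOf y) 0) : Int) := by
      intro y hy
      have h1 : L.idxOf y < L.length := List.idxOf_lt_length_iff.mpr hy
      rw [List.getD_eq_getElem L 0 h1, List.getElem_idxOf h1]
    -- split set(L) around the winning value and apply the first-extremal lemma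
    have haS : L.getD jn 0 ∈ PySem.Set.ofList L := (PySem.Set.mem_ofList _ _).mpr haL
    obtain ⟨pre, post, hsplit⟩ := List.append_of_mem haS
    have hpw := ofList_pairwise_idxOf L
    rw [hsplit] at hpw
    have hmem : ∀ y, y ∈ pre ∨ y ∈ post → y ∈ L := by
      intro y hy
      have hyS : y ∈ PySem.Set.ofList L := by
        rw [hsplit]
        rcases hy with hy | hy <;> simp [hy]
      exact (PySem.Set.mem_ofList _ _).mp hyS
    have h1 : ∀ y ∈ pre, (L.count y : Int) < (L.count (L.getD jn 0) : Int) := by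
      intro y hy
      have hyL := hmem y (Or.inl hy)
      have hylt : L.idxOf y < jn := by
        have h := (List.pairwise_append.mp hpw).2.2 y hy (L.getD jn 0) (by simp)
        omega
      rw [hcnt y hyL]
      exact hfirst _ hylt
    have h2 : ∀ y ∈ post, ¬ (L.count (L.getD jn 0) : Int) < (L.count y : Int) := by
      intro y hy
      have hyL := hmem y (Or.inr hy)
      have h1' : L.idxOf y < L.length := List.idxOf_lt_length_iff.mpr hyL
      rw [hcnt y hyL]
      have := hmax _ h1'
      omega
    rw [hsplit, max?_of_split (fun v => (L.count v : Int)) pre post (L.getD jn 0) h1 h2]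
    rfl

-- B's per-key freq dict is Counter(list_count) for L = [m.get(key,0) for m in count_map_list]
theorem freq_eq_counter (count_map_list : List (List (String × Int))) (key : String) :
    count_map_list.foldl
      (fun (d : PySem.Dict Int Int) count_map =>
        d.insert (PySem.Dict.getD (PySem.Dict.mk count_map) key 0)
          (d.getD (PySem.Dict.getD (PySem.Dict.mk count_map) key 0) 0 + 1))
      PySem.Dict.empty
    = PySem.Dict.counter
        (count_map_list.map (fun m => PySem.Dict.getD (PySem.Dict.mk m) key 0)) := by
  rw [← PySem.Dict.foldl_insert_getD_add_one_eq_counter, List.foldl_map]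

-- ===== VERDICT (by name: the statement is the Claim_ definition above) =====
theorem get_vote_count_result_spec : Claim_equal_get_vote_count_result := by
  intro count_map_list key_predict _ _
  unfold Spec_get_vote_count_result get_vote_count_result get_vote_count_result_alt
  congr 1
  apply PySem.List.foldl_congr_mem
  intro result key _
  simp only [PySem.List.foldl_append_singleton_eq_map, List.nil_append, freq_eq_counter,
    PySem.Dict.keys_counter, PySem.Dict.getD_counter]
  rw [perKey_eq]
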